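-- pv_equiv track=rewrite | github.com/abhiiibabariya-dev/CyberNest | correlator/engine/sigma_loader.py | _tokenize_condition
-- ===== SOURCE A (Python) =====
-- def _tokenize_condition(condition_str: str) -> list[str]:
--     """Tokenize a Sigma condition expression."""
--     # Handle parentheses, AND, OR, NOT, 1 of, all of
--     tokens: list[str] = []
--     i = 0
--     s = condition_str.strip()
--     while i < len(s):
--         if s[i].isspace():
--             i += 1
--             continue
--         if s[i] == "(":
--             tokens.append("(")
--             i += 1
--         elif s[i] == ")":
--             tokens.append(")")
--             i += 1
--         else:
--             # Read a word
--             j = i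
--             while j < len(s) and not s[j].isspace() and s[j] not in ("(", ")"):
--                 j += 1
--             word = s[i:j]
--             tokens.append(word)
--             i = j
--     return tokens
-- ===== SOURCE B (Python) =====
-- def _tokenize_condition(condition_str: str) -> list[str]:
--     """Tokenize a Sigma condition expression (single-pass state machine)."""
--     tokens: list[str] = []
--     word = ""
--     for c in condition_str:
--         if c.isspace():
--             if word:
--                 tokens.append(word)
--                 word = ""
--         elif c in "()":
--             if word:
--                 tokens.append(word)
--                 word = ""
--             tokens.append(c)
--         else:
--             word += c
--     if word:
--         tokens.append(word)
--     return tokens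
-- ===== Notes on version B (the rewrite author's own statement) =====
-- stated objective: simpler
-- what changed: Replaced the index-cursor loop with an inner word-scanning while and slice s[i:j] (plus a redundant initial strip) by a single direct pass over the characters with a current-word buffer that is flushed at separators; no indices, no slicing, no strip.
import Mathlib
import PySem

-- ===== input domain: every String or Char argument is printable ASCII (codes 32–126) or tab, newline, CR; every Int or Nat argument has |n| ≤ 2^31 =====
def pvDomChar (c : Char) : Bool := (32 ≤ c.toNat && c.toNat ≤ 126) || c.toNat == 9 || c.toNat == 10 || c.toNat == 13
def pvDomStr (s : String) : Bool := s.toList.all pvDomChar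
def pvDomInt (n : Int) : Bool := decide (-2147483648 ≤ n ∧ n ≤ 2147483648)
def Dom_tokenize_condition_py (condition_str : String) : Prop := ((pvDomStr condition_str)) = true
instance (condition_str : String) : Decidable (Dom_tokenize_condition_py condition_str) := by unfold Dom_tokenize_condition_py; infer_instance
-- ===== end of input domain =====

-- B replaces A's index-cursor/inner-while tokenizer by a single pass with a word buffer: simpler, same O(n) cost.


-- ===== PORT A =====
-- word characters: not whitespace and not a parenthesis (the inner while's condition)
def pvWordChar (c : Char) : Bool := !(PySem.Chars.isspace c) && !(c == '(') && !(c == ')')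

-- A's main while loop over the stripped string; the inner word scan 'while j < len(s) …' and the
-- slice word = s[i:j] are the takeWhile/dropWhile pair on the remaining characters
def pvLoopA : List Char → List String
  | [] => []
  | c :: rest =>
    if PySem.Chars.isspace c then pvLoopA rest
    else if c == '(' then "(" :: pvLoopA rest
    else if c == ')' then ")" :: pvLoopA rest
    else String.ofList ((c :: rest).takeWhile pvWordChar) ::
           pvLoopA ((c :: rest).dropWhile pvWordChar)
termination_by cs => cs.length
decreasing_by
  · simp
  · simp
  · simp
  · rename_i h1 h2 h3
    have hpc : pvWordChar c = true := by
      simp at h1 h2 h3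
      simp [pvWordChar]
      exact ⟨⟨h1, h2⟩, h3⟩
    simp only [List.dropWhile_cons, hpc, if_true, List.length_cons]
    exact Nat.lt_succ_of_le (List.length_dropWhile_le _ _)

def tokenize_condition_py (condition_str : String) : List String :=
  pvLoopA (PySem.Chars.strip condition_str.toList)

-- ===== PORT B =====
-- B's single pass; the second argument is the current word buffer
def pvLoopB : List Char → List Char → List String
  | [], w => if w.isEmpty then [] else [String.ofList w]
  | c :: rest, w =>
    if PySem.Chars.isspace c then
      if w.isEmpty then pvLoopB rest [] else String.ofList w :: pvLoopB rest []
    else if c == '(' || c == ')' then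
      if w.isEmpty then String.ofList [c] :: pvLoopB rest []
      else String.ofList w :: String.ofList [c] :: pvLoopB rest []
    else pvLoopB rest (w ++ [c])

def tokenize_condition_py_alt (condition_str : String) : List String :=
  pvLoopB condition_str.toList []

-- ===== PRECONDITION & SPEC =====
def Spec_tokenize_condition_py (condition_str : String) (out : List String) : Prop := out = tokenize_condition_py_alt condition_str
instance (condition_str : String) (out : List String) : Decidable (Spec_tokenize_condition_py condition_str out) := by unfold Spec_tokenize_condition_py; infer_instance

-- ===== CLAIM (what is proved, stated in full; the proofs are below) =====
def Claim_equal_tokenize_condition_py : Prop := ∀ (condition_str : String), Dom_tokenize_condition_py condition_str → Spec_tokenize_condition_py condition_str (tokenize_condition_py condition_str)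

-- ===== LEMMAS AND PROOFS =====

-- takeWhile/dropWhile through an append whose first part is all-true and next char fails
lemma pv_tw_app (p : Char → Bool) (w : List Char) (c : Char) (rest : List Char)
    (hw : ∀ d ∈ w, p d) (hc : p c = false) :
    (w ++ c :: rest).takeWhile p = w ∧ (w ++ c :: rest).dropWhile p = c :: rest := by
  induction w with
  | nil => simp [hc]
  | cons d t ih =>
    have hd : p d = true := hw d (by simp)
    have ht : ∀ e ∈ t, p e = true := fun e he => hw e (by simp [he])
    obtain ⟨h1, h2⟩ := ih ht
    simp [hd, h1, h2]

lemma pv_wordChar_props {c : Char} (h : pvWordChar c = true) :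
    PySem.Chars.isspace c = false ∧ (c == '(') = false ∧ (c == ')') = false := by
  simp [pvWordChar] at h
  exact ⟨h.1.1, by simp [h.1.2], by simp [h.2]⟩

-- a nonempty all-word-character string is one token for A's loop
lemma pv_loopA_word (w : List Char) (hne : w ≠ []) (hw : ∀ d ∈ w, pvWordChar d) :
    pvLoopA w = [String.ofList w] := by
  cases w with
  | nil => exact absurd rfl hne
  | cons c t =>
    obtain ⟨hcs, hcp, hcq⟩ := pv_wordChar_props (hw c (by simp))
    rw [pvLoopA]
    simp only [hcs, hcp, hcq, Bool.false_eq_true, if_false]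
    have h1 : (c :: t).takeWhile pvWordChar = c :: t := by
      rw [List.takeWhile_eq_self_iff]; exact hw
    have h2 : (c :: t).dropWhile pvWordChar = [] := by
      rw [List.dropWhile_eq_nil_iff]; exact hw
    rw [h1, h2, pvLoopA]

-- MAIN: B's buffer loop equals A's loop on the buffer prepended to the rest
lemma pv_loopB_eq_loopA (cs : List Char) : ∀ w, (∀ d ∈ w, pvWordChar d) →
    pvLoopB cs w = pvLoopA (w ++ cs) := by
  induction cs with
  | nil =>
    intro w hw
    rw [pvLoopB]
    by_cases hweq : w = []
    · subst hweq; simp [pvLoopA]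
    · simp [List.isEmpty_iff, hweq, pv_loopA_word w hweq hw]
  | cons c rest ih =>
    intro w hw
    by_cases hsp : PySem.Chars.isspace c = true
    · -- whitespace: flush the buffer
      have hA : pvLoopA (c :: rest) = pvLoopA rest := by rw [pvLoopA]; simp [hsp]
      rw [pvLoopB]
      simp only [hsp, if_true]
      by_cases hweq : w = []
      · subst hweq; simpa [hA] using ih [] (by simp)
      · have hwc : pvWordChar c = false := by simp [pvWordChar, hsp]
        obtain ⟨h1, h2⟩ := pv_tw_app pvWordChar w c rest hw hwc
        obtain ⟨d, t, rfl⟩ := List.exists_cons_of_ne_nil hweq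
        obtain ⟨hds, hdp, hdq⟩ := pv_wordChar_props (hw d (by simp))
        rw [List.cons_append, pvLoopA]
        simp only [hds, hdp, hdq, Bool.false_eq_true, if_false]
        rw [← List.cons_append, h1, h2, hA]
        simp [ih [] (by simp)]
    · by_cases hpar : (c == '(' || c == ')') = true
      · -- parenthesis: flush the buffer, emit the paren
        have hA : pvLoopA (c :: rest) = String.ofList [c] :: pvLoopA rest := by
          rcases Bool.or_eq_true_iff.mp hpar with h | h
          · have hc : c = '(' := by simpa using h
            subst hc; rw [pvLoopA]
            have : PySem.Chars.isspace '(' = false := by decide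
            simp [this]
          · have hc : c = ')' := by simpa using h
            subst hc; rw [pvLoopA]
            have h1 : PySem.Chars.isspace ')' = false := by decide
            have h2 : (')' == '(') = false := by decide
            simp [h1, h2]
        have hwc : pvWordChar c = false := by
          rcases Bool.or_eq_true_iff.mp hpar with h | h
          · have hc : c = '(' := by simpa using h
            subst hc; simp [pvWordChar]
          · have hc : c = ')' := by simpa using h
            subst hc; simp [pvWordChar]
        rw [pvLoopB]
        simp only [hsp, Bool.false_eq_true, if_false, hpar, if_true]
        by_cases hweq : w = []
        · subst hweq; simpa [hA] using ih [] (by simp)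
        · obtain ⟨h1, h2⟩ := pv_tw_app pvWordChar w c rest hw hwc
          obtain ⟨d, t, rfl⟩ := List.exists_cons_of_ne_nil hweq
          obtain ⟨hds, hdp, hdq⟩ := pv_wordChar_props (hw d (by simp))
          rw [List.cons_append, pvLoopA]
          simp only [hds, hdp, hdq, Bool.false_eq_true, if_false]
          rw [← List.cons_append, h1, h2, hA]
          simp [ih [] (by simp)]
      · -- word character: extend the buffer
        have hwc : pvWordChar c = true := by
          simp only [Bool.or_eq_true] at hpar
          push Not at hpar
          simp [pvWordChar, hsp, Bool.eq_false_iff.mpr hpar.1, Bool.eq_false_iff.mpr hpar.2]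
        rw [pvLoopB]
        simp only [hsp, Bool.false_eq_true, if_false, hpar]
        rw [ih (w ++ [c]) (by
          intro d hd
          rcases List.mem_append.mp hd with h | h
          · exact hw d h
          · simp at h; subst h; exact hwc)]
        simp

-- a run of whitespace yields no tokens
lemma pv_loopA_spaces (sp : List Char) (hsp : ∀ d ∈ sp, PySem.Chars.isspace d) :
    pvLoopA sp = [] := by
  induction sp with
  | nil => rw [pvLoopA]
  | cons c t ih =>
    rw [pvLoopA]
    simp [hsp c (by simp), ih fun d hd => hsp d (by simp [hd])]

lemma pv_sp_take (sp : List Char) (hsp : ∀ d ∈ sp, PySem.Chars.isspace d) :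
    sp.takeWhile pvWordChar = [] ∧ sp.dropWhile pvWordChar = sp := by
  cases sp with
  | nil => simp
  | cons e t =>
    have he : pvWordChar e = false := by simp [pvWordChar, hsp e (by simp)]
    simp [he]

-- trailing whitespace does not change A's loop
lemma pv_loopA_append_spaces (cs : List Char) : ∀ sp, (∀ d ∈ sp, PySem.Chars.isspace d) →
    pvLoopA (cs ++ sp) = pvLoopA cs := by
  induction cs using pvLoopA.induct with
  | case1 =>
    intro sp hsp
    simpa [pvLoopA] using pv_loopA_spaces sp hsp
  | case2 c rest hc ih =>
    intro sp hsp
    rw [List.cons_append, pvLoopA, pvLoopA]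
    simp only [hc, if_true]
    exact ih sp hsp
  | case3 c rest hc1 hc2 ih =>
    intro sp hsp
    rw [List.cons_append, pvLoopA, pvLoopA]
    simp only [hc1, hc2, Bool.false_eq_true, if_false, if_true]
    rw [ih sp hsp]
  | case4 c rest hc1 hc2 hc3 ih =>
    intro sp hsp
    rw [List.cons_append, pvLoopA, pvLoopA]
    simp only [hc1, hc2, hc3, Bool.false_eq_true, if_false, if_true]
    rw [ih sp hsp]
  | case5 c rest hc1 hc2 hc3 ih =>
    intro sp hsp
    rw [List.cons_append, pvLoopA, pvLoopA]
    simp only [hc1, hc2, hc3, Bool.false_eq_true, if_false]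
    rw [← List.cons_append, List.takeWhile_append, List.dropWhile_append]
    by_cases hall : ((c :: rest).takeWhile pvWordChar).length = (c :: rest).length
    · have hts : (c :: rest).takeWhile pvWordChar = c :: rest :=
        (List.takeWhile_prefix _).eq_of_length hall
      have hds : (c :: rest).dropWhile pvWordChar = [] := by
        have h := List.takeWhile_append_dropWhile (p := pvWordChar) (l := c :: rest)
        rw [hts] at h
        have hlen : ((c :: rest).dropWhile pvWordChar).length = 0 := by
          have h2 := congrArg List.length h
          rw [List.length_append] at h2
          omega
        exact List.eq_nil_of_length_eq_zero hlen
      obtain ⟨hspt, hspd⟩ := pv_sp_take sp hsp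
      rw [if_pos hall, if_pos (by rw [hds]; rfl), hspt, hspd, hts, hds]
      simp [pv_loopA_spaces sp hsp, pvLoopA]
    · have hdne : (c :: rest).dropWhile pvWordChar ≠ [] := by
        intro h
        have := List.takeWhile_append_dropWhile (p := pvWordChar) (l := c :: rest)
        rw [h, List.append_nil] at this
        exact hall (by rw [this])
      rw [if_neg hall, if_neg (by simpa [List.isEmpty_iff] using hdne)]
      rw [ih sp hsp]

-- stripping leading whitespace does not change A's loop
lemma pv_loopA_dropWhile (cs : List Char) :
    pvLoopA (cs.dropWhile PySem.Chars.isspace) = pvLoopA cs := by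
  induction cs with
  | nil => rfl
  | cons c rest ih =>
    by_cases hc : PySem.Chars.isspace c = true
    · rw [List.dropWhile_cons, if_pos hc, ih, pvLoopA, if_pos hc]
    · rw [List.dropWhile_cons, if_neg (by simpa using hc)]

-- A's initial strip is redundant for A's loop
lemma pv_loopA_strip (cs : List Char) :
    pvLoopA (PySem.Chars.strip cs) = pvLoopA cs := by
  unfold PySem.Chars.strip PySem.Chars.rstrip PySem.Chars.lstrip
  set ls := cs.dropWhile PySem.Chars.isspace with hls
  have hdecomp : ls = (ls.reverse.dropWhile PySem.Chars.isspace).reverse ++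
      (ls.reverse.takeWhile PySem.Chars.isspace).reverse := by
    have h := List.takeWhile_append_dropWhile (p := PySem.Chars.isspace) (l := ls.reverse)
    calc ls = ls.reverse.reverse := (List.reverse_reverse ls).symm
      _ = (ls.reverse.takeWhile PySem.Chars.isspace ++
            ls.reverse.dropWhile PySem.Chars.isspace).reverse := by rw [h]
      _ = _ := by rw [List.reverse_append]
  have hsp : ∀ d ∈ (ls.reverse.takeWhile PySem.Chars.isspace).reverse,
      PySem.Chars.isspace d := by
    intro d hd
    exact List.mem_takeWhile_imp (List.mem_reverse.mp hd)
  calc pvLoopA (ls.reverse.dropWhile PySem.Chars.isspace).reverse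
      = pvLoopA ((ls.reverse.dropWhile PySem.Chars.isspace).reverse ++
          (ls.reverse.takeWhile PySem.Chars.isspace).reverse) :=
        (pv_loopA_append_spaces _ _ hsp).symm
    _ = pvLoopA ls := by rw [← hdecomp]
    _ = pvLoopA cs := pv_loopA_dropWhile cs

-- ===== VERDICT (by name: the statement is the Claim_ definition above) =====
theorem tokenize_condition_py_spec : Claim_equal_tokenize_condition_py := by
  intro s _
  unfold Spec_tokenize_condition_py tokenize_condition_py tokenize_condition_py_alt
  rw [pv_loopB_eq_loopA s.toList [] (by simp), List.nil_append, pv_loopA_strip]
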